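-- pv_equiv track=rewrite | github.com/Botizety/AUVAP-refactoring | rag/memory_system.py | _extract_key_code
-- ===== SOURCE A (Python) =====
-- from typing import Any, Dict, List, Optional
--
-- def _extract_key_code(script: str) -> str:
--     lines = script.splitlines()
--     imports = [line for line in lines if line.startswith("import") or line.startswith("from ")]
--     excerpt_lines: List[str] = []
--     in_function = False
--     for line in lines:
--         if line.startswith("def exploit"):
--             in_function = True
--         if in_function:
--             excerpt_lines.append(line)
--         if in_function and len(excerpt_lines) >= 12:
--             break
--     return "\n".join(imports[:5] + excerpt_lines)
-- ===== SOURCE B (Python) =====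
-- def _extract_key_code(script: str) -> str:
--     lines = script.splitlines()
--     imports = [line for line in lines if line.startswith("import") or line.startswith("from ")]
--     idx = next((i for i, l in enumerate(lines) if l.startswith("def exploit")), None)
--     excerpt = [] if idx is None else lines[idx:idx + 12]
--     return "\n".join(imports[:5] + excerpt)
-- ===== Notes on version B (the rewrite author's own statement) =====
-- stated objective: simpler
-- what changed: Replaces the flag-based accumulating loop with an explicit break condition by an index-find (first line starting with 'def exploit') followed by a 12-line slice.
import Mathlib
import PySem

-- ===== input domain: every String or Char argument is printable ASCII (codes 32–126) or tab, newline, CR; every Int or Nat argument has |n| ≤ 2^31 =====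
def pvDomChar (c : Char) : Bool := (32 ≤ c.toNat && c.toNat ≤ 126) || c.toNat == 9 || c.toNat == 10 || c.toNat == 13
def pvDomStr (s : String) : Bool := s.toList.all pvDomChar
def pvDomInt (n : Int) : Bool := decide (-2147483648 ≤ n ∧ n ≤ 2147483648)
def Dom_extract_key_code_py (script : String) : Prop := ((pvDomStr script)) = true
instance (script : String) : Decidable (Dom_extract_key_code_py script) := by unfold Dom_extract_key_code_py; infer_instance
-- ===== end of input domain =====

-- B replaces A's flag-based accumulating loop (with its break) by finding the index of the
-- first 'def exploit' line and slicing the next 12 lines: simpler decomposition, same cost.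

-- ===== PORT A =====
-- A's for-loop with the in_function flag, the append and the break, as structural recursion
-- over the remaining lines with state (excerpt_lines, in_function).
def pvALoop (ls : List String) (excerpt : List String) (inf : Bool) : List String :=
  match ls with
  | [] => excerpt
  | line :: rest =>
    let inf2 := PySem.Str.startswith line "def exploit" || inf  -- if …: in_function = True
    let ex2 := if inf2 then excerpt ++ [line] else excerpt
    if inf2 && decide (12 ≤ ex2.length) then ex2 else pvALoop rest ex2 inf2

def extract_key_code_py (script : String) : String :=
  let lines := PySem.Str.splitlines script
  let imports := lines.filter (fun l =>
    PySem.Str.startswith l "import" || PySem.Str.startswith l "from ")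
  let excerpt := pvALoop lines [] false
  PySem.Str.join "\n" (PySem.List.slice imports none (some 5) ++ excerpt)

-- ===== PORT B =====
def extract_key_code_py_alt (script : String) : String :=
  let lines := PySem.Str.splitlines script
  let imports := lines.filter (fun l =>
    PySem.Str.startswith l "import" || PySem.Str.startswith l "from ")
  -- next((i for i, l in enumerate(lines) if l.startswith("def exploit")), None)
  let idx? := ((PySem.List.enumerate lines 0).find?
      (fun p => PySem.Str.startswith p.2 "def exploit")).map (·.1)
  let excerpt := match idx? with
    | none => []
    | some i => PySem.List.slice lines (some i) (some (i + 12))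
  PySem.Str.join "\n" (PySem.List.slice imports none (some 5) ++ excerpt)

-- ===== PRECONDITION & SPEC =====
def Spec_extract_key_code_py (script : String) (out : String) : Prop := out = extract_key_code_py_alt script
instance (script : String) (out : String) : Decidable (Spec_extract_key_code_py script out) := by unfold Spec_extract_key_code_py; infer_instance

-- ===== CLAIM (what is proved, stated in full; the proofs are below) =====
def Claim_equal_extract_key_code_py : Prop := ∀ (script : String), Dom_extract_key_code_py script → Spec_extract_key_code_py script (extract_key_code_py script)

-- ===== LEMMAS AND PROOFS =====

-- Once in_function is true, A's loop appends lines until the excerpt reaches 12 lines.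
theorem pvALoop_true (ls : List String) : ∀ (acc : List String), acc.length < 12 →
    pvALoop ls acc true = acc ++ ls.take (12 - acc.length) := by
  induction ls with
  | nil => intro acc _; simp [pvALoop]
  | cons line rest ih =>
    intro acc h
    by_cases h12 : 12 ≤ acc.length + 1
    · have hl : acc.length = 11 := by omega
      have h1 : 12 - acc.length = 1 := by omega
      simp [pvALoop, hl, h1]
    · have hs : 12 - acc.length = (12 - (acc.length + 1)) + 1 := by omega
      simp [pvALoop, show ¬ 12 ≤ acc.length + 1 from h12,
        ih (acc ++ [line]) (by simp; omega), hs, List.take_succ_cons]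

-- A's whole loop computes: nothing before the first 'def exploit' line, then 12 lines from it.
theorem pvALoop_eq_findIdx (ls : List String) :
    pvALoop ls [] false =
      match List.findIdx? (fun l => PySem.Str.startswith l "def exploit") ls with
      | none => []
      | some k => (ls.drop k).take 12 := by
  induction ls with
  | nil => simp [pvALoop]
  | cons line rest ih =>
    rw [List.findIdx?_cons]
    by_cases hq : PySem.Str.startswith line "def exploit"
    · rw [if_pos hq]
      have h1 : pvALoop (line :: rest) [] false = pvALoop rest [line] true := by
        simp only [pvALoop, hq, Bool.true_or, if_true, List.nil_append, List.length_cons,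
          List.length_nil, eq_self_iff_true, Bool.true_and]
        norm_num
      rw [h1, pvALoop_true rest [line] (by simp)]
      simp [List.take_succ_cons]
    · have hqf : PySem.Str.startswith line "def exploit" = false :=
        (Bool.not_eq_true (PySem.Str.startswith line "def exploit")) ▸ hq
      have h1 : pvALoop (line :: rest) [] false = pvALoop rest [] false := by
        simp only [pvALoop, hqf, Bool.or_self, Bool.false_eq_true, if_false,
          Bool.false_and, ite_false]
      rw [if_neg hq, h1, ih]
      cases List.findIdx? (fun l => PySem.Str.startswith l "def exploit") rest with
      | none => simp
      | some k => simp [List.drop_succ_cons]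

-- B's index-find over enumerate is findIdx? shifted by the start.
theorem find_enumerate (ls : List String) : ∀ (s : Int),
    ((PySem.List.enumerate ls s).find?
        (fun p => PySem.Str.startswith p.2 "def exploit")).map (·.1)
      = (List.findIdx? (fun l => PySem.Str.startswith l "def exploit") ls).map
          (fun k : Nat => s + (k : Int)) := by
  induction ls with
  | nil => intro s; simp [PySem.List.enumerate_nil]
  | cons line rest ih =>
    intro s
    rw [PySem.List.enumerate_cons, List.findIdx?_cons]
    by_cases hq : PySem.Str.startswith line "def exploit"
    · rw [List.find?_cons_of_pos (p := fun q : Int × String => PySem.Str.startswith q.2 "def exploit") (by exact hq), if_pos hq]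
      simp
    · rw [List.find?_cons_of_neg (p := fun q : Int × String => PySem.Str.startswith q.2 "def exploit") (by exact hq), ih (s + 1), if_neg hq]
      cases List.findIdx? (fun l => PySem.Str.startswith l "def exploit") rest with
      | none => simp
      | some k =>
        simp only [Option.map_some]
        congr 1
        push_cast
        ring

-- ===== VERDICT (by name: the statement is the Claim_ definition above) =====
theorem extract_key_code_py_spec : Claim_equal_extract_key_code_py := by
  intro script _
  unfold Spec_extract_key_code_py extract_key_code_py extract_key_code_py_alt
  simp only [find_enumerate, pvALoop_eq_findIdx, zero_add]
  cases h : List.findIdx? (fun l => PySem.Str.startswith l "def exploit")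
      (PySem.Str.splitlines script) with
  | none => simp
  | some k =>
    simp only [h, Option.map_some]
    rw [show ((k : Int) + 12) = ((k : Int) + ((12 : Nat) : Int)) by norm_num,
      PySem.List.slice_natCast_add]
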